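-- pv_equiv track=rewrite | github.com/gautam-prab/latin-authorship | src/feature-extraction.py | legomena
-- ===== SOURCE A (Python) =====
-- import collections
--
-- def legomena(lemmas): #iterable is the list of lemmas
--     tuples = [tuple(x) for x in lemmas]
--     counts = collections.Counter(tuples)
--     hapax = []
--     dis = []
--     for t in tuples:
--         if counts[t] == 1: #exactly once
--             hapax.append(t)
--         elif counts[t] == 2 and t not in dis: #exactly twice
--             dis.append(t)
--     return hapax, dis
-- ===== SOURCE B (Python) =====
-- import collections
--
-- def legomena(lemmas):
--     counts = collections.Counter(tuple(x) for x in lemmas)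
--     hapax = [t for t, c in counts.items() if c == 1]
--     dis = [t for t, c in counts.items() if c == 2]
--     return hapax, dis
-- ===== Notes on version B (the rewrite author's own statement) =====
-- stated objective: simpler
-- what changed: Instead of scanning the full tuples list with an 'elif t not in dis' linear membership dedup, B iterates once over the Counter's unique keys (insertion = first-appearance order) and filters by count, removing the inner scan and the dedup branch entirely.
import Mathlib
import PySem

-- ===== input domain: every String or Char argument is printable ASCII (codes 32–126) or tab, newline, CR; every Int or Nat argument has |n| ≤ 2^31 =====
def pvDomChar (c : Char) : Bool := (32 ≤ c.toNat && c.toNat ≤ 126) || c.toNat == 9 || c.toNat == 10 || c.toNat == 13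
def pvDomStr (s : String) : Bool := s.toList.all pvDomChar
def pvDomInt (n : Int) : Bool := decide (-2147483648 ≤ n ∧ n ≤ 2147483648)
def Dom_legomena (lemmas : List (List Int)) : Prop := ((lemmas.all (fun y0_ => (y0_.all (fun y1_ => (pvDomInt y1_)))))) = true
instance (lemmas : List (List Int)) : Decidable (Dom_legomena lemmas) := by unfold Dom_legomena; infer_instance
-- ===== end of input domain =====

-- B iterates once over the Counter's unique keys instead of over all tuples with a
-- linear 't not in dis' dedup scan: shorter and without the membership branch.

-- ===== PORT A =====
def legomena (lemmas : List (List Int)) : List (List Int) × List (List Int) :=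
  let tuples := lemmas.map (fun x => x)  -- tuple(x): identity under the type convention
  let counts := PySem.Dict.counter tuples
  tuples.foldl (fun hd t =>
    if counts.getD t 0 = 1 then (hd.1 ++ [t], hd.2)
    else if counts.getD t 0 = 2 ∧ t ∉ hd.2 then (hd.1, hd.2 ++ [t])
    else hd) ([], [])

-- ===== PORT B =====
def legomena_alt (lemmas : List (List Int)) : List (List Int) × List (List Int) :=
  let counts := PySem.Dict.counter (lemmas.map (fun x => x))
  let hapax := (counts.items.filter (fun p => p.2 == 1)).map (fun p => p.1)
  let dis := (counts.items.filter (fun p => p.2 == 2)).map (fun p => p.1)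
  (hapax, dis)

-- ===== PRECONDITION & SPEC =====
def Spec_legomena (lemmas : List (List Int)) (out : List (List Int) × List (List Int)) : Prop := out = legomena_alt lemmas
instance (lemmas : List (List Int)) (out : List (List Int) × List (List Int)) : Decidable (Spec_legomena lemmas out) := by unfold Spec_legomena; infer_instance

-- ===== CLAIM (what is proved, stated in full; the proofs are below) =====
def Claim_equal_legomena : Prop := ∀ (lemmas : List (List Int)), Dom_legomena lemmas → Spec_legomena lemmas (legomena lemmas)

-- ===== LEMMAS AND PROOFS =====

-- first occurrences of l, skipping anything already in the seen-list s
def seenDedup (s : List (List Int)) : List (List Int) → List (List Int)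
  | [] => []
  | x :: l => if x ∈ s then seenDedup s l else x :: seenDedup (s ++ [x]) l

-- A's dis accumulation relative to a seen-list d, counts looked up through f
def disFrom (f : List Int → Int) (d : List (List Int)) : List (List Int) → List (List Int)
  | [] => []
  | t :: l => if f t = 2 ∧ t ∉ d then t :: disFrom f (d ++ [t]) l else disFrom f d l

theorem seenDedup_nil_cons (x : List Int) (l : List (List Int)) :
    seenDedup [] (x :: l) = x :: seenDedup [x] l := by
  simp [seenDedup]

theorem foldl_add_eq (l : List (List Int)) :
    ∀ s, l.foldl PySem.Set.add s = s ++ seenDedup s l := by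
  induction l with
  | nil => intro s; simp [seenDedup]
  | cons x l ih =>
    intro s
    simp only [List.foldl_cons, seenDedup]
    by_cases hx : x ∈ s
    · rw [if_pos hx]
      have : PySem.Set.add s x = s := by simp [PySem.Set.add, PySem.Set.contains, hx]
      rw [this, ih]
    · rw [if_neg hx]
      have : PySem.Set.add s x = s ++ [x] := by simp [PySem.Set.add, PySem.Set.contains, hx]
      rw [this, ih]
      simp

theorem ofList_eq_seenDedup (l : List (List Int)) :
    PySem.Set.ofList l = seenDedup [] l := by
  rw [PySem.Set.ofList_eq_foldl, foldl_add_eq]; simp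

theorem seenDedup_shift (l : List (List Int)) :
    ∀ s, seenDedup s l = (seenDedup [] l).filter (fun t => decide (t ∉ s)) := by
  induction l with
  | nil => intro s; simp [seenDedup]
  | cons x l ih =>
    intro s
    rw [seenDedup_nil_cons, List.filter_cons]
    simp only [seenDedup]
    by_cases hx : x ∈ s
    · rw [if_pos hx, if_neg (by simp [hx]), ih s, ih [x], List.filter_filter]
      apply List.filter_congr
      intro t _
      by_cases ht : t ∈ s
      · simp [ht]
      · simp [ht, show t ≠ x from fun h => ht (h ▸ hx)]
    · rw [if_neg hx, if_pos (by simp [hx])]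
      congr 1
      rw [ih (s ++ [x]), ih [x], List.filter_filter]
      apply List.filter_congr
      intro t _
      by_cases ht : t ∈ s <;> by_cases htx : t = x <;> simp [ht, htx, List.mem_append]

theorem loop_eq (f : List Int → Int) (l : List (List Int)) :
    ∀ h d, l.foldl (fun hd t =>
        if f t = 1 then (hd.1 ++ [t], hd.2)
        else if f t = 2 ∧ t ∉ hd.2 then (hd.1, hd.2 ++ [t])
        else hd) (h, d)
      = (h ++ l.filter (fun t => decide (f t = 1)), d ++ disFrom f d l) := by
  induction l with
  | nil => intro h d; simp [disFrom]
  | cons t l ih =>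
    intro h d
    simp only [List.foldl_cons, List.filter_cons, disFrom]
    by_cases h1 : f t = 1
    · rw [if_pos h1, ih]
      simp [h1]
    · rw [if_neg h1]
      by_cases h2 : f t = 2 ∧ t ∉ d
      · rw [if_pos h2, if_pos h2, ih]
        simp [h1]
      · rw [if_neg h2, if_neg h2, ih]
        simp [h1]

theorem mem_seenDedup (x : List Int) (l : List (List Int)) :
    x ∈ seenDedup [] l → x ∈ l := by
  intro h
  induction l with
  | nil => simp [seenDedup] at h
  | cons y l ih =>
    rw [seenDedup_nil_cons, List.mem_cons] at h
    rcases h with h | h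
    · simp [h]
    · rw [seenDedup_shift, List.mem_filter] at h
      exact List.mem_cons_of_mem _ (ih (by simpa [seenDedup] using h.1))

theorem disFrom_eq (f : List Int → Int) (l : List (List Int)) :
    ∀ d, disFrom f d l
      = ((seenDedup [] l).filter (fun t => decide (f t = 2))).filter (fun t => decide (t ∉ d)) := by
  induction l with
  | nil => intro d; simp [disFrom, seenDedup]
  | cons x l ih =>
    intro d
    rw [seenDedup_nil_cons, seenDedup_shift l [x], List.filter_filter, List.filter_cons,
      List.filter_filter]
    simp only [disFrom]
    by_cases h2 : f x = 2
    · by_cases hd : x ∈ d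
      · rw [if_neg (fun h => h.2 hd), if_neg (by simp [hd, h2]), ih d, List.filter_filter]
        apply List.filter_congr
        intro t _
        by_cases htx : t = x
        · simp [htx, hd]
        · by_cases ht : t ∈ d <;> simp [ht, htx]
      · rw [if_pos ⟨h2, hd⟩, if_pos (by simp [hd, h2]), ih (d ++ [x]), List.filter_filter]
        congr 1
        apply List.filter_congr
        intro t _
        by_cases htx : t = x
        · simp [htx]
        · by_cases ht : t ∈ d <;> simp [ht, htx, List.mem_append]
    · rw [if_neg (fun h => h2 h.1), if_neg (by simp [h2]), ih d, List.filter_filter]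
      apply List.filter_congr
      intro t _
      by_cases htx : t = x
      · simp [htx, h2]
      · simp [htx]

theorem hapax_filter_eq (m : List (List Int)) (p : List Int → Bool)
    (hp : ∀ t ∈ m, p t = true → m.count t = 1) :
    m.filter p = (seenDedup [] m).filter p := by
  induction m with
  | nil => simp [seenDedup]
  | cons x m ih =>
    rw [seenDedup_nil_cons, seenDedup_shift m [x], List.filter_cons, List.filter_cons,
      List.filter_filter]
    have htail : ∀ t ∈ m, p t = true → m.count t = 1 := by
      intro t htm hpt
      have hcons := hp t (List.mem_cons_of_mem _ htm) hpt
      rcases eq_or_ne t x with rfl | hne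
      · rw [List.count_cons_self] at hcons
        have := List.count_pos_iff.mpr htm
        omega
      · rw [List.count_cons] at hcons
        simpa [hne.symm] using hcons
    by_cases hx : p x = true
    · rw [if_pos hx, if_pos hx]
      have hx1 := hp x List.mem_cons_self hx
      rw [List.count_cons_self] at hx1
      have hxm : x ∉ m := by
        intro hmem
        have := List.count_pos_iff.mpr hmem
        omega
      rw [ih htail]
      congr 1
      apply List.filter_congr
      intro t htm
      have hne : t ≠ x := fun h => hxm (h ▸ mem_seenDedup t m htm)
      simp [hne]
    · rw [if_neg (by simpa using hx), if_neg (by simpa using hx), ih htail]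
      apply List.filter_congr
      intro t _
      by_cases htx : t = x
      · simp [htx, hx]
      · simp [htx]

-- ===== VERDICT (by name: the statement is the Claim_ definition above) =====
theorem legomena_spec : Claim_equal_legomena := by
  intro ts _
  unfold Spec_legomena legomena legomena_alt
  simp only [List.map_id']
  rw [PySem.Dict.items_counter, ofList_eq_seenDedup,
    loop_eq (fun t => (PySem.Dict.counter ts).getD t 0) ts [] [], disFrom_eq,
    List.filter_map, List.filter_map]
  simp only [List.nil_append, PySem.Dict.getD_counter, List.map_map, Function.comp_def,
    List.map_id']
  rw [show (fun x => ((ts.count x : Int) == 1)) = (fun t => decide ((ts.count t : Int) = 1)) from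
      funext fun k => Bool.beq_eq_decide_eq _ _,
    show (fun x => ((ts.count x : Int) == 2)) = (fun t => decide ((ts.count t : Int) = 2)) from
      funext fun k => Bool.beq_eq_decide_eq _ _,
    Prod.mk.injEq]
  constructor
  · exact hapax_filter_eq ts _ (fun t _ h => by have := of_decide_eq_true h; omega)
  · rw [List.filter_filter]
    apply List.filter_congr
    intro t _
    simp
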